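-- pv_equiv track=rewrite | github.com/itertius/cmu-homework | cmu01.py | calculate_exp_
-- ===== SOURCE A (Python) =====
-- def calculate_exp_(p:int, c:int) -> int :
--     res=0
--     while p>0 :
--         if c-12>=0 :
--             c-=12
--             res+=1000
--             c+=2
--         c+=1
--         p-=1
--     return res
-- ===== SOURCE B (Python) =====
-- def _tail(p, c, res):
--     # c <= 12 here: p climbing steps to reach 12, then one trigger per 10-step cycle
--     g = 12 - c
--     if p <= g:
--         return res
--     p -= g
--     q, r = divmod(p, 10)
--     return res + 1000 * q + (1000 if r >= 1 else 0)
--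
-- def calculate_exp_(p, c):
--     if p <= 0:
--         return 0
--     if c >= 12:
--         k = (c - 3) // 9          # consecutive trigger steps until c drops below 12
--         m = min(p, k)
--         res = 1000 * m
--         if p == m:
--             return res
--         return _tail(p - m, c - 9 * m, res)
--     return _tail(p, c, 0)
-- ===== Notes on version B (the rewrite author's own statement) =====
-- stated objective: faster
-- what changed: B replaces the p-step simulation by closed arithmetic: it counts the initial run of consecutive triggers while c>=12 with a division, then the climb to 12 and full 10-step cycles via divmod.
import Mathlib
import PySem

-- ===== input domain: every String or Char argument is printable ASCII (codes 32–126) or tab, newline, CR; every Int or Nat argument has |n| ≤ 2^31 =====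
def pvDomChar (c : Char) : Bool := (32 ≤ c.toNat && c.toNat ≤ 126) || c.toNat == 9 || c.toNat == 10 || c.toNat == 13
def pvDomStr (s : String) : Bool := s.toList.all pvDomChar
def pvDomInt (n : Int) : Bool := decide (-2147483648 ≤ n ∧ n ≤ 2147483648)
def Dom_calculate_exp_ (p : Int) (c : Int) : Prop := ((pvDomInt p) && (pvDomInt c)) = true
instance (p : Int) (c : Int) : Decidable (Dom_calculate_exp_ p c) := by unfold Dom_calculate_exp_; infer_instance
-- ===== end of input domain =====

-- B replaces A's p-step simulation by closed arithmetic on the state machine's short cycle (objective: faster).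


-- ===== PORT A =====
-- while p>0: the loop decrements p by exactly 1 each pass, so p.toNat iterations is exact
def loopA : Nat → Int → Int → Int
  | 0, _, res => res
  | n+1, c, res =>
      if c - 12 ≥ 0 then loopA n (c - 12 + 2 + 1) (res + 1000)
      else loopA n (c + 1) res

def calculate_exp_ (p : Int) (c : Int) : Int := loopA p.toNat c 0

-- ===== PORT B =====
def tailB (p : Int) (c : Int) (res : Int) : Int :=
  if p ≤ 12 - c then res
  else
    res + 1000 * PySem.Int.floordiv (p - (12 - c)) 10 +
      (if 1 ≤ PySem.Int.mod (p - (12 - c)) 10 then 1000 else 0)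

def calculate_exp__alt (p : Int) (c : Int) : Int :=
  if p ≤ 0 then 0
  else if 12 ≤ c then
    if p = min p (PySem.Int.floordiv (c - 3) 9) then
      1000 * min p (PySem.Int.floordiv (c - 3) 9)
    else
      tailB (p - min p (PySem.Int.floordiv (c - 3) 9))
        (c - 9 * min p (PySem.Int.floordiv (c - 3) 9))
        (1000 * min p (PySem.Int.floordiv (c - 3) 9))
  else tailB p c 0

-- ===== PRECONDITION & SPEC =====
def Spec_calculate_exp_ (p : Int) (c : Int) (out : Int) : Prop := out = calculate_exp__alt p c
instance (p : Int) (c : Int) (out : Int) : Decidable (Spec_calculate_exp_ p c out) := by unfold Spec_calculate_exp_; infer_instance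

-- ===== CLAIM (what is proved, stated in full; the proofs are below) =====
def Claim_equal_calculate_exp_ : Prop := ∀ (p : Int) (c : Int), Dom_calculate_exp_ p c → Spec_calculate_exp_ p c (calculate_exp_ p c)

-- ===== LEMMAS AND PROOFS =====

-- trigger count of A's loop: T n c = number of steps with c ≥ 12, times nothing (in units of 1)
def T : Nat → Int → Int
  | 0, _ => 0
  | n+1, c => if 12 ≤ c then 1 + T n (c - 9) else T n (c + 1)

lemma loopA_eq (n : Nat) : ∀ (c res : Int), loopA n c res = res + 1000 * T n c := by
  induction n with
  | zero => intro c res; simp [loopA, T]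
  | succ n ih =>
    intro c res
    by_cases h : 12 ≤ c
    · have h' : c - 12 ≥ 0 := by omega
      simp only [loopA, T, if_pos h, if_pos h']
      rw [ih]
      have : c - 12 + 2 + 1 = c - 9 := by ring
      rw [this]; ring
    · have h' : ¬ c - 12 ≥ 0 := by omega
      simp only [loopA, T, if_neg h, if_neg h']
      exact ih _ _

lemma T_climb (n : Nat) : ∀ (c : Int), c ≤ 12 → (n : Int) ≤ 12 - c → T n c = 0 := by
  induction n with
  | zero => intro c _ _; rfl
  | succ n ih =>
    intro c hc hle
    have h : ¬ 12 ≤ c := by push_cast at hle; omega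
    simp only [T, if_neg h]
    exact ih (c + 1) (by omega) (by push_cast at hle ⊢; omega)

lemma T_reach12 (g : Nat) : ∀ (c : Int) (n : Nat), c = 12 - g → T (n + g) c = T n 12 := by
  induction g with
  | zero => intro c n hc; simp at hc; simp [hc]
  | succ g ih =>
    intro c n hc
    have h : ¬ 12 ≤ c := by push_cast at hc; omega
    have e : n + (g + 1) = (n + g) + 1 := by omega
    rw [e]
    simp only [T, if_neg h]
    exact ih (c + 1) n (by push_cast at hc ⊢; omega)

lemma T12 (n : Nat) : T (n + 1) 12 = 1 + T n 3 := by
  simp only [T, if_pos (by norm_num : (12:Int) ≤ 12)]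
  norm_num

lemma T_cycle (n : Nat) : T (n + 10) 3 = 1 + T n 3 := by
  have h := T_reach12 9 3 (n + 1) (by norm_num)
  have e : n + 1 + 9 = n + 10 := by omega
  rw [e] at h
  rw [h, T12]

lemma T3 (m : Nat) : T m 3 = ((m / 10 : Nat) : Int) := by
  induction m using Nat.strong_induction_on with
  | _ m ih =>
    by_cases h : m < 10
    · rw [T_climb m 3 (by norm_num) (by push_cast; omega)]
      have : m / 10 = 0 := by omega
      simp [this]
    · have e : m = (m - 10) + 10 := by omega
      rw [e, T_cycle, ih (m - 10) (by omega)]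
      have h2 : (m - 10) / 10 + 1 = (m - 10 + 10) / 10 := by omega
      rw [← h2]; push_cast; ring

-- the tail: for p ≥ 1 and c ≤ 12, tailB computes res + 1000 * T p.toNat c
lemma tailB_eq (p c res : Int) (hp : 1 ≤ p) (hc : c ≤ 12) :
    tailB p c res = res + 1000 * T p.toNat c := by
  simp only [tailB]
  set n := p.toNat with hn
  have hpn : (n : Int) = p := Int.toNat_of_nonneg (by omega)
  by_cases h : p ≤ 12 - c
  · rw [if_pos h, T_climb n c hc (by omega)]; ring
  · rw [if_neg h]
    set gN := (12 - c).toNat with hg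
    have hgc : (gN : Int) = 12 - c := Int.toNat_of_nonneg (by omega)
    have hng : gN < n := by omega
    have hsplit : n = (n - gN - 1 + 1) + gN := by omega
    have h12 : c = 12 - (gN : Int) := by omega
    have hT : T n c = 1 + T (n - gN - 1) 3 := by
      conv_lhs => rw [hsplit]
      rw [T_reach12 gN c _ h12, T12]
    rw [hT, T3]
    have hd : PySem.Int.floordiv (p - (12 - c)) 10 = (p - (12 - c)) / 10 :=
      PySem.Int.floordiv_eq_ediv_of_pos (by norm_num)
    have hm : PySem.Int.mod (p - (12 - c)) 10 = (p - (12 - c)) % 10 :=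
      PySem.Int.mod_eq_emod_of_pos (by norm_num)
    rw [hd, hm]
    have hdiv : (((n - gN - 1) / 10 : Nat) : Int) = (p - (12 - c) - 1) / 10 := by omega
    rw [hdiv]
    split_ifs with hr <;> omega

-- consecutive triggers while c ≥ 12: min n k steps of c ↦ c - 9, each counted
lemma T_descent (k : Nat) : ∀ (n : Nat) (c : Int), 3 ≤ c - 9 * k → c - 9 * k < 12 → 12 ≤ c →
    T n c = (min n k : Nat) + T (n - min n k) (c - 9 * (min n k : Nat)) := by
  induction k with
  | zero => intro n c h1 h2 h12; push_cast at h2; omega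
  | succ k ih =>
    intro n c h1 h2 h12
    cases n with
    | zero => simp
    | succ n =>
      have hT : T (n + 1) c = 1 + T n (c - 9) := by simp only [T, if_pos h12]
      have hmin : min (n + 1) (k + 1) = min n k + 1 := by omega
      rw [hT, hmin]
      by_cases hk : k = 0
      · subst hk
        simp only [Nat.min_zero]
        have e1 : n + 1 - (0 + 1) = n := by omega
        rw [e1]
        push_cast
        ring
      · have h12' : 12 ≤ c - 9 := by push_cast at h1; omega
        have ihh := ih n (c - 9) (by push_cast at h1 ⊢; omega) (by push_cast at h2 ⊢; omega) h12'
        rw [ihh]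
        have e1 : n + 1 - (min n k + 1) = n - min n k := by omega
        have e2 : c - 9 * ((min n k + 1 : Nat) : Int) = c - 9 - 9 * (min n k : Nat) := by
          push_cast; ring
        rw [e1, e2]
        push_cast
        ring

-- ===== VERDICT (by name: the statement is the Claim_ definition above) =====
theorem calculate_exp__spec : Claim_equal_calculate_exp_ := by
  intro p c _
  show calculate_exp_ p c = calculate_exp__alt p c
  unfold calculate_exp_ calculate_exp__alt
  rw [loopA_eq]
  by_cases hp : p ≤ 0
  · rw [if_pos hp]
    have : p.toNat = 0 := by omega
    simp [this, T]
  · rw [if_neg hp]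
    have hp1 : 1 ≤ p := by omega
    have hpn : (p.toNat : Int) = p := Int.toNat_of_nonneg (by omega)
    by_cases hc : 12 ≤ c
    · rw [if_pos hc]
      set kI := PySem.Int.floordiv (c - 3) 9 with hkI
      have hke : kI = (c - 3) / 9 := PySem.Int.floordiv_eq_ediv_of_pos (by norm_num)
      have hk1 : 1 ≤ kI := by rw [hke]; omega
      have hkb1 : 3 ≤ c - 9 * kI := by rw [hke]; omega
      have hkb2 : c - 9 * kI < 12 := by rw [hke]; omega
      set kN := kI.toNat with hkN
      have hkc : (kN : Int) = kI := Int.toNat_of_nonneg (by omega)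
      have hdesc := T_descent kN p.toNat c (by rw [hkc]; exact hkb1) (by rw [hkc]; exact hkb2) hc
      by_cases hpm : p = min p kI
      · rw [if_pos hpm]
        have hple : p ≤ kI := by omega
        have hmn : min p.toNat kN = p.toNat := by omega
        rw [hmn] at hdesc
        simp only [Nat.sub_self] at hdesc
        rw [hdesc]
        simp only [T]
        rw [hpn, ← hpm]
        ring
      · rw [if_neg hpm]
        have hklt : kI < p := by omega
        have hmn : min p.toNat kN = kN := by omega
        rw [hmn] at hdesc
        have hc' : c - 9 * min p kI ≤ 12 := by
          have : min p kI = kI := by omega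
          rw [this]; omega
        rw [tailB_eq _ _ _ (by omega) hc']
        rw [hdesc]
        have e1 : (p - min p kI).toNat = p.toNat - kN := by omega
        have e2 : c - 9 * min p kI = c - 9 * (kN : Int) := by
          have : min p kI = kI := by omega
          rw [this, hkc]
        rw [e1, e2]
        have e3 : 1000 * min p kI = 1000 * (kN : Int) := by
          have : min p kI = kI := by omega
          rw [this, hkc]
        rw [e3]
        ring
    · rw [if_neg hc]
      rw [tailB_eq _ _ _ hp1 (by omega)]
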